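-- pv_equiv track=rewrite | github.com/EM0V0/MeDUSA | backend/backend-py/firmware_service.py | _is_rollback
-- ===== SOURCE A (Python) =====
-- def _is_rollback(new_version: str, current_version: str) -> bool:
--     """
--     Check if new version is older than current (rollback attempt).
--
--     Uses semantic versioning comparison (major.minor.patch).
--     """
--     try:
--         new_parts = [int(x) for x in new_version.split('.')]
--         current_parts = [int(x) for x in current_version.split('.')]
--
--         # Pad to same length
--         while len(new_parts) < len(current_parts):
--             new_parts.append(0)
--         while len(current_parts) < len(new_parts):
--             current_parts.append(0)
--
--         # Compare version components
--         for new, current in zip(new_parts, current_parts):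
--             if new < current:
--                 return True
--             if new > current:
--                 return False
--
--         # Versions are equal - not a rollback (but also not an upgrade)
--         return False
--     except ValueError:
--         # If version parsing fails, treat as potential rollback
--         return True
-- ===== SOURCE B (Python) =====
-- def _older(new_parts, current_parts):
--     """Recursive lexicographic test with implicit zero for missing components:
--     no padding pass at all."""
--     if not new_parts and not current_parts:
--         return False
--     n = new_parts[0] if new_parts else 0
--     c = current_parts[0] if current_parts else 0
--     return n < c if n != c else _older(new_parts[1:], current_parts[1:])
--
--
-- def _is_rollback(new_version: str, current_version: str) -> bool:
--     try:
--         new_parts = [int(x) for x in new_version.split('.')]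
--         current_parts = [int(x) for x in current_version.split('.')]
--     except ValueError:
--         return True
--     return _older(new_parts, current_parts)
-- ===== Notes on version B (the rewrite author's own statement) =====
-- stated objective: alternative
-- what changed: Drops A's two padding while-loops and zip-based three-way early-return loop: B recurses structurally over the two (possibly unequal-length) parsed lists at once, treating a missing component as an implicit 0, deciding at the first unequal pair.
import Mathlib
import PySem

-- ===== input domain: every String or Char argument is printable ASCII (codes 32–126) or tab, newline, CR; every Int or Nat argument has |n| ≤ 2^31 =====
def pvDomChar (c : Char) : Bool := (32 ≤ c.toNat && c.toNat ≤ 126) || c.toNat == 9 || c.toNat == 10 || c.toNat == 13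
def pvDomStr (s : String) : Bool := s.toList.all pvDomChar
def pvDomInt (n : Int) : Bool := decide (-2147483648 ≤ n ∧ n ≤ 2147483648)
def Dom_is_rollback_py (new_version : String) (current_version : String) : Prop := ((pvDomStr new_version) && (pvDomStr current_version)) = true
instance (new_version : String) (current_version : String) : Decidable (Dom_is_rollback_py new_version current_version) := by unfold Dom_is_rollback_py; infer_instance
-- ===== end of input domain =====

-- B drops A's two padding while-loops and the zip-based three-way compare loop:
-- it recurses over both parsed lists at once, a missing component counting as 0 (alternative).

-- ===== PORT A =====
-- while len(xs) < n: xs.append(0)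
def pvPadLoop (xs : List Int) (n : Nat) : List Int :=
  if xs.length < n then pvPadLoop (xs ++ [0]) n else xs
termination_by n - xs.length
decreasing_by simp_all; omega

-- for new, current in zip(...): three-way early return
def pvCmpLoop : List (Int × Int) → Bool
  | [] => false
  | (n, c) :: rest => if n < c then true else if n > c then false else pvCmpLoop rest

def is_rollback_py (new_version : String) (current_version : String) : Bool :=
  match ((PySem.Str.split? new_version ".").getD []).mapM PySem.Int.ofStr?,
        ((PySem.Str.split? current_version ".").getD []).mapM PySem.Int.ofStr? with
  | some new_parts, some current_parts =>
      let new_parts' := pvPadLoop new_parts current_parts.length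
      let current_parts' := pvPadLoop current_parts new_parts'.length
      pvCmpLoop (new_parts'.zip current_parts')
  | _, _ => true  -- ValueError from int(x)

-- ===== PORT B =====
-- _older: structural recursion over both lists, missing component = 0
def pvOlder : List Int → List Int → Bool
  | [], [] => false
  | [], c :: cs => if (0 : Int) ≠ c then decide ((0 : Int) < c) else pvOlder [] cs
  | n :: ns, [] => if n ≠ (0 : Int) then decide (n < 0) else pvOlder ns []
  | n :: ns, c :: cs => if n ≠ c then decide (n < c) else pvOlder ns cs

def is_rollback_py_alt (new_version : String) (current_version : String) : Bool :=
  match ((PySem.Str.split? new_version ".").getD []).mapM PySem.Int.ofStr? with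
  | none => true  -- ValueError from int(x)
  | some new_parts =>
      match ((PySem.Str.split? current_version ".").getD []).mapM PySem.Int.ofStr? with
      | none => true
      | some current_parts => pvOlder new_parts current_parts

-- ===== PRECONDITION & SPEC =====
def Spec_is_rollback_py (new_version : String) (current_version : String) (out : Bool) : Prop := out = is_rollback_py_alt new_version current_version
instance (new_version : String) (current_version : String) (out : Bool) : Decidable (Spec_is_rollback_py new_version current_version out) := by unfold Spec_is_rollback_py; infer_instance

-- ===== CLAIM (what is proved, stated in full; the proofs are below) =====
def Claim_equal_is_rollback_py : Prop := ∀ (new_version : String) (current_version : String), Dom_is_rollback_py new_version current_version → Spec_is_rollback_py new_version current_version (is_rollback_py new_version current_version)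

-- ===== LEMMAS AND PROOFS =====

lemma pvPadLoop_eq_aux (n : Nat) : ∀ (k : Nat) (xs : List Int), n - xs.length ≤ k →
    pvPadLoop xs n = xs ++ List.replicate (n - xs.length) 0 := by
  intro k
  induction k with
  | zero =>
      intro xs h
      rw [pvPadLoop]
      have h1 : ¬ xs.length < n := by omega
      have h2 : n - xs.length = 0 := by omega
      simp [h1, h2]
  | succ k ih =>
      intro xs h
      rw [pvPadLoop]
      split_ifs with hlt
      · rw [ih (xs ++ [0]) (by simp; omega)]
        have h3 : n - xs.length = (n - (xs ++ [0]).length) + 1 := by simp; omega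
        rw [h3, List.replicate_succ]
        simp
      · have h2 : n - xs.length = 0 := by omega
        simp [h2]

lemma pvPadLoop_eq (xs : List Int) (n : Nat) :
    pvPadLoop xs n = xs ++ List.replicate (n - xs.length) 0 :=
  pvPadLoop_eq_aux n (n - xs.length) xs le_rfl

-- A's padded compare loop computes B's recursive no-padding compare
lemma pvCmp_pad_eq_older : ∀ (a b : List Int),
    pvCmpLoop ((a ++ List.replicate (max a.length b.length - a.length) 0).zip
               (b ++ List.replicate (max a.length b.length - b.length) 0)) = pvOlder a b := by
  intro a
  induction a with
  | nil =>
      intro b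
      induction b with
      | nil => simp [pvCmpLoop, pvOlder]
      | cons c cs ihb =>
          simp only [List.length_nil, List.length_cons, Nat.zero_max, Nat.sub_zero,
            Nat.sub_self, List.replicate_succ, List.replicate_zero, List.nil_append,
            List.append_nil, List.zip_cons_cons, pvCmpLoop, pvOlder]
          by_cases h : (0 : Int) < c
          · simp [h, h.ne]
          · by_cases h2 : (0 : Int) > c
            · simp [h, h2, h2.ne']
            · have hc : (0 : Int) = c := by omega
              subst hc
              simpa using ihb
  | cons n ns ih =>
      intro b
      cases b with
      | nil =>
          have : ∀ m : List Int,
              pvCmpLoop ((m ++ List.replicate (max m.length 0 - m.length) 0).zip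
                ([] ++ List.replicate (max m.length 0 - 0) 0)) = pvOlder m [] := by
            intro m
            induction m with
            | nil => simp [pvCmpLoop, pvOlder]
            | cons x xs ihm =>
                simp only [List.length_cons, Nat.max_zero, Nat.sub_self,
                  List.replicate_zero, List.append_nil, Nat.sub_zero, List.replicate_succ,
                  List.nil_append, List.zip_cons_cons, pvCmpLoop, pvOlder]
                by_cases h : x < 0
                · simp [h, h.ne]
                · by_cases h2 : x > 0
                  · simp [h, h2, h2.ne']
                  · have hx : x = 0 := by omega
                    subst hx
                    simpa using ihm
          exact this (n :: ns)
      | cons c cs =>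
          simp only [List.length_cons]
          have h1 : max (ns.length + 1) (cs.length + 1) - (ns.length + 1)
              = max ns.length cs.length - ns.length := by omega
          have h2 : max (ns.length + 1) (cs.length + 1) - (cs.length + 1)
              = max ns.length cs.length - cs.length := by omega
          rw [h1, h2]
          simp only [List.cons_append, List.zip_cons_cons, pvCmpLoop, pvOlder]
          by_cases h : n < c
          · simp [h, h.ne]
          · by_cases h3 : n > c
            · simp [h, h3, h3.ne']
            · have hn : n = c := by omega
              subst hn
              simpa using ih cs

-- ===== VERDICT (by name: the statement is the Claim_ definition above) =====
theorem is_rollback_py_spec : Claim_equal_is_rollback_py := by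
  intro nv cv _
  unfold Spec_is_rollback_py is_rollback_py is_rollback_py_alt
  cases hn : ((PySem.Str.split? nv ".").getD []).mapM PySem.Int.ofStr? with
  | none => cases ((PySem.Str.split? cv ".").getD []).mapM PySem.Int.ofStr? <;> rfl
  | some np =>
    cases hc : ((PySem.Str.split? cv ".").getD []).mapM PySem.Int.ofStr? with
    | none => rfl
    | some cp =>
      simp only [pvPadLoop_eq]
      have hlen : (np ++ List.replicate (cp.length - np.length) 0).length
          = max np.length cp.length := by simp; omega
      rw [hlen]
      have h1 : cp.length - np.length = max np.length cp.length - np.length := by omega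
      rw [h1]
      exact pvCmp_pad_eq_older np cp
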